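-- pv_equiv track=rewrite | github.com/berdan-a46/Tottenham-Stadium-Events-V2 | scripts/TMEvents.py | dedupeEvents
-- ===== SOURCE A (Python) =====
-- def dedupeEvents(events):
--     eventsDictionary = {}
--
--     for event in events:
--         eventType, name, dateStr, timeStr = event
--         key = (dateStr, timeStr)
--
--         if key not in eventsDictionary:
--             eventsDictionary[key] = event
--         else:
--             # Compare the duplicates. Keep the one with a shorter name
--             existingEvent = eventsDictionary[key]
--             if len(name) < len(existingEvent[1]):
--                 eventsDictionary[key] = event
--
--     # Convert dictionary back to a list of events
--     dedupedEvents = list(eventsDictionary.values())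
--     return dedupedEvents
-- ===== SOURCE B (Python) =====
-- def dedupeEvents(events):
--     # Two-pass: group events by (dateStr, timeStr) in first-seen key order,
--     # then pick the first shortest-named event of each group with min.
--     groups = {}
--     for event in events:
--         key = (event[2], event[3])
--         groups[key] = groups.get(key, []) + [event]
--     return [min(g, key=lambda e: len(e[1])) for g in groups.values()]
-- ===== Notes on version B (the rewrite author's own statement) =====
-- stated objective: alternative
-- what changed: Instead of maintaining a single running-best event per (date,time) key inline, B builds a dict of full per-key groups in one pass and then reduces each group with min(key=len(name)) in a second pass; dict insertion order and min's keep-first-on-strict-tie rule reproduce A's output exactly.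
import Mathlib
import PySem

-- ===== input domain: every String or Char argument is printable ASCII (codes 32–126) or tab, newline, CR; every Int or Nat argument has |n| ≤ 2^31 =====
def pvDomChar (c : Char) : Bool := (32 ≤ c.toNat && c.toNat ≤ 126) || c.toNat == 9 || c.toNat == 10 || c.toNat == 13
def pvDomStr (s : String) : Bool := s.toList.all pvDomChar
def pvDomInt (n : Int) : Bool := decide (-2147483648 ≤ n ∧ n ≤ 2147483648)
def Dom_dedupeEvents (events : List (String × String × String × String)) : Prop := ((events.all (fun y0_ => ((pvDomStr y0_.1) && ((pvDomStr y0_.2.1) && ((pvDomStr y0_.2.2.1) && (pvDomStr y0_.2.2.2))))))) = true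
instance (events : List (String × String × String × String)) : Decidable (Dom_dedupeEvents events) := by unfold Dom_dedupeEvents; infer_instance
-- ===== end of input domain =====

-- B replaces A's inline running-best-per-key update with a two-pass grouping dict plus a min-per-group reduction (alternative decomposition, same cost).


-- ===== PORT A =====
-- A's loop body: keep the first event per (dateStr, timeStr) key, replacing it only on a strictly shorter name
def pvStepA (d : PySem.Dict (String × String) (String × String × String × String))
    (e : String × String × String × String) :
    PySem.Dict (String × String) (String × String × String × String) :=
  let k := (e.2.2.1, e.2.2.2)
  if d.contains k = false then d.insert k e
  else
    match d.get? k with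
    | some ex => if PySem.Str.len e.2.1 < PySem.Str.len ex.2.1 then d.insert k e else d
    | none => d  -- unreachable (key is contained); total-guard only

def dedupeEvents (events : List (String × String × String × String)) : List (String × String × String × String) :=
  (events.foldl pvStepA PySem.Dict.empty).values

-- ===== PORT B =====
-- B's grouping step: groups[key] = groups.get(key, []) + [event]
def pvStepB (d : PySem.Dict (String × String) (List (String × String × String × String)))
    (e : String × String × String × String) :
    PySem.Dict (String × String) (List (String × String × String × String)) :=
  d.modify (e.2.2.1, e.2.2.2) [] (fun g => g ++ [e])

-- min(g, key=lambda e: len(e[1])); the [] case never arises (groups are nonempty), total-guard only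
def pvBest (g : List (String × String × String × String)) : String × String × String × String :=
  match PySem.List.min? g (fun e => PySem.Str.len e.2.1) with
  | some m => m
  | none => ("", "", "", "")

def dedupeEvents_alt (events : List (String × String × String × String)) : List (String × String × String × String) :=
  ((events.foldl pvStepB PySem.Dict.empty).values).map pvBest

-- ===== PRECONDITION & SPEC =====
def Spec_dedupeEvents (events : List (String × String × String × String)) (out : List (String × String × String × String)) : Prop := out = dedupeEvents_alt events
instance (events : List (String × String × String × String)) (out : List (String × String × String × String)) : Decidable (Spec_dedupeEvents events out) := by unfold Spec_dedupeEvents; infer_instance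

-- ===== CLAIM (what is proved, stated in full; the proofs are below) =====
def Claim_equal_dedupeEvents : Prop := ∀ (events : List (String × String × String × String)), Dom_dedupeEvents events → Spec_dedupeEvents events (dedupeEvents events)

-- ===== LEMMAS AND PROOFS =====

-- the value-reduction that relates a B-group to A's stored event
def pvF (p : (String × String) × List (String × String × String × String)) :
    (String × String) × (String × String × String × String) :=
  (p.1, pvBest p.2)

theorem pvBest_singleton (e : String × String × String × String) : pvBest [e] = e := rfl

theorem pvMin?_append (g : List (String × String × String × String))
    (e : String × String × String × String) :
    PySem.List.min? (g ++ [e]) (fun x => PySem.Str.len x.2.1) =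
      match PySem.List.min? g (fun x => PySem.Str.len x.2.1) with
      | none => some e
      | some m => some (if PySem.Str.len e.2.1 < PySem.Str.len m.2.1 then e else m) := by
  simp only [PySem.List.min?, List.foldl_append, List.foldl_cons, List.foldl_nil]
  split <;> rename_i hf <;> rw [hf]
  all_goals first
    | rfl
    | (split_ifs with h <;> simp [h] <;>
        (simp only [PySem.Str.len_eq, String.length_toList] at h; intro h2; exfalso; omega))

theorem pvBest_append (g : List (String × String × String × String)) (e : String × String × String × String)
    (hg : g ≠ []) :
    pvBest (g ++ [e]) = if PySem.Str.len e.2.1 < PySem.Str.len (pvBest g).2.1 then e else pvBest g := by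
  rcases hm : PySem.List.min? g (fun x => PySem.Str.len x.2.1) with _ | m
  · exact absurd ((PySem.List.min?_eq_none_iff _ _).mp hm) hg
  · simp only [pvBest, pvMin?_append, hm]

theorem pvGet?_map (l : List ((String × String) × List (String × String × String × String))) (k : String × String) :
    (PySem.Dict.mk (l.map pvF)).get? k = ((PySem.Dict.mk l).get? k).map pvBest := by
  induction l with
  | nil => rfl
  | cons p t ih =>
    show (PySem.Dict.mk ((p.1, pvBest p.2) :: t.map pvF)).get? k = _
    rw [PySem.Dict.get?_mk_cons, PySem.Dict.get?_mk_cons]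
    by_cases h : p.1 == k
    · simp [h]
    · simp [h, ih]

theorem pvContains_map (l : List ((String × String) × List (String × String × String × String))) (k : String × String) :
    (PySem.Dict.mk (l.map pvF)).contains k = (PySem.Dict.mk l).contains k := by
  simp [PySem.Dict.contains, List.any_map, Function.comp_def, pvF]

theorem pvMain : ∀ (l : List (String × String × String × String))
    (dB : PySem.Dict (String × String) (List (String × String × String × String))),
    dB.keys.Nodup → (∀ p ∈ dB.items, p.2 ≠ []) →
    l.foldl pvStepA (PySem.Dict.mk (dB.items.map pvF)) =
      PySem.Dict.mk ((l.foldl pvStepB dB).items.map pvF) := by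
  intro l
  induction l with
  | nil => intro dB _ _; rfl
  | cons e t ih =>
    intro dB hnd hne
    simp only [List.foldl_cons]
    have hstep : pvStepA (PySem.Dict.mk (dB.items.map pvF)) e =
        PySem.Dict.mk ((pvStepB dB e).items.map pvF) := by
      set k : String × String := (e.2.2.1, e.2.2.2) with hk
      cases hc : dB.contains k with
      | false =>
        have hcA : (PySem.Dict.mk (dB.items.map pvF)).contains k = false := by
          rw [pvContains_map]; exact hc
        have hB : pvStepB dB e = dB.insert k [e] := by
          simp only [pvStepB, PySem.Dict.modify, ← hk,
            PySem.Dict.getD_of_not_contains dB [] hc, List.nil_append]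
        have hA : pvStepA (PySem.Dict.mk (dB.items.map pvF)) e =
            (PySem.Dict.mk (dB.items.map pvF)).insert k e := by
          simp [pvStepA, ← hk, hcA]
        rw [hA, hB]
        apply PySem.Dict.ext
        rw [PySem.Dict.items_insert_of_not_contains _ _ hcA,
          PySem.Dict.items_insert_of_not_contains _ _ hc]
        simp [pvF, pvBest_singleton]
      | true =>
        rcases hg : dB.get? k with _ | g
        · rw [PySem.Dict.contains_eq_isSome_get?, hg] at hc; simp at hc
        have hgmem : (k, g) ∈ dB.items := PySem.Dict.mem_items_of_get?_eq_some dB hg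
        have hgne : g ≠ [] := hne _ hgmem
        have hgetD : dB.getD k [] = g := PySem.Dict.getD_of_get?_eq_some dB [] hg
        have hcA : (PySem.Dict.mk (dB.items.map pvF)).contains k = true := by
          rw [pvContains_map]; exact hc
        have hgA : (PySem.Dict.mk (dB.items.map pvF)).get? k = some (pvBest g) := by
          rw [pvGet?_map, hg]; rfl
        have hB : pvStepB dB e = dB.insert k (g ++ [e]) := by
          simp only [pvStepB, PySem.Dict.modify, ← hk, hgetD]
        have hBitems : (pvStepB dB e).items =
            dB.items.map (fun p => if p.1 == k then (k, g ++ [e]) else p) := by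
          rw [hB]; exact PySem.Dict.items_insert_of_contains dB _ hc
        have hbw : pvBest (g ++ [e]) =
            if PySem.Str.len e.2.1 < PySem.Str.len (pvBest g).2.1 then e else pvBest g :=
          pvBest_append g e hgne
        have hA : pvStepA (PySem.Dict.mk (dB.items.map pvF)) e =
            (if PySem.Str.len e.2.1 < PySem.Str.len (pvBest g).2.1
              then (PySem.Dict.mk (dB.items.map pvF)).insert k e
              else PySem.Dict.mk (dB.items.map pvF)) := by
          simp [pvStepA, ← hk, hcA, hgA]
        rw [hA]
        apply PySem.Dict.ext
        rw [hBitems, List.map_map]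
        by_cases hcond : PySem.Str.len e.2.1 < PySem.Str.len (pvBest g).2.1
        · have hw : pvBest (g ++ [e]) = e := by rw [hbw, if_pos hcond]
          rw [if_pos hcond]
          rw [PySem.Dict.items_insert_of_contains _ _ hcA, List.map_map]
          apply List.map_congr_left
          intro p hp
          by_cases hpk : p.1 = k
          · simp [pvF, hpk, hw]
          · simp [pvF, hpk]
        · have hw : pvBest (g ++ [e]) = pvBest g := by rw [hbw, if_neg hcond]
          rw [if_neg hcond]
          show (dB.items.map pvF) = _
          apply List.map_congr_left
          intro p hp
          by_cases hpk : p.1 = k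
          · have hpeq : p = (k, g) := by
              have hnodup : (dB.items.map (fun q => q.1)).Nodup := hnd
              exact List.inj_on_of_nodup_map hnodup hp hgmem hpk
            simp [pvF, hpeq, hw]
          · simp [pvF, hpk]
    rw [hstep]
    apply ih
    · -- keys of the new dB stay Nodup
      simp only [pvStepB, PySem.Dict.modify]
      cases hc : dB.contains (e.2.2.1, e.2.2.2) with
      | true => rw [PySem.Dict.keys_insert_of_contains _ _ hc]; exact hnd
      | false =>
        have hkmem : (e.2.2.1, e.2.2.2) ∉ dB.keys := by
          rw [PySem.Dict.contains_eq_decide_mem_keys] at hc; simpa using hc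
        rw [PySem.Dict.keys_insert_of_not_contains _ _ hc]
        exact List.Nodup.append hnd (List.nodup_singleton _)
          (by simp [List.disjoint_singleton]; exact hkmem)
    · -- groups stay nonempty
      intro p hp
      simp only [pvStepB, PySem.Dict.modify] at hp
      cases hc : dB.contains (e.2.2.1, e.2.2.2) with
      | true =>
        rw [PySem.Dict.items_insert_of_contains _ _ hc] at hp
        rcases List.mem_map.mp hp with ⟨q, hq, hqe⟩
        by_cases hqk : q.1 == (e.2.2.1, e.2.2.2)
        · rw [if_pos hqk] at hqe; subst hqe; simp
        · rw [if_neg hqk] at hqe; subst hqe; exact hne _ hq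
      | false =>
        rw [PySem.Dict.items_insert_of_not_contains _ _ hc] at hp
        rcases List.mem_append.mp hp with h | h
        · exact hne _ h
        · simp at h; subst h; simp

-- ===== VERDICT (by name: the statement is the Claim_ definition above) =====
theorem dedupeEvents_spec : Claim_equal_dedupeEvents := by
  intro events _
  show dedupeEvents events = dedupeEvents_alt events
  unfold dedupeEvents dedupeEvents_alt
  have h := pvMain events PySem.Dict.empty (by simp [PySem.Dict.keys, PySem.Dict.empty])
    (by intro p hp; simp [PySem.Dict.empty] at hp)
  have hstart : PySem.Dict.mk (((PySem.Dict.empty :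
      PySem.Dict (String × String) (List (String × String × String × String))).items).map pvF) =
      (PySem.Dict.empty : PySem.Dict (String × String) (String × String × String × String)) := rfl
  rw [hstart] at h
  rw [h]
  simp [PySem.Dict.values, List.map_map, pvF, Function.comp_def]
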